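-- pv_equiv track=rewrite | github.com/zentrum-lexikographie/wordprofile | query/moduls/drawTable.py | calculate_border
-- ===== SOURCE A (Python) =====
-- def fill(count, strObj):
--     strResult = ''
--     for i in range(0, count):
--         strResult = strResult + strObj
--     return strResult
--
-- def calculate_border(listLength):
--     strResult = '╞═'
--     iCounter = 0
--     for i in listLength:
--         strToken = fill(listLength[iCounter], '═')
--
--         if iCounter == len(listLength) - 1:
--             strResult = strResult + strToken + '═╡'
--         else:
--             strResult = strResult + strToken + '═╪═'
--         iCounter = iCounter + 1
--     return strResult
--     pass
-- ===== SOURCE B (Python) =====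
-- def calculate_border(listLength):
--     if not listLength:
--         return '╞═'
--     return '╞═' + '═╪═'.join('═' * w for w in listLength) + '═╡'
-- ===== Notes on version B (the rewrite author's own statement) =====
-- stated objective: idiomatic
-- what changed: Replaces the indexed loop with its per-iteration last-element branch (and the fill helper loop) by a single str.join over '═'*w segments, with the end cap appended once outside any loop.
import Mathlib
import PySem

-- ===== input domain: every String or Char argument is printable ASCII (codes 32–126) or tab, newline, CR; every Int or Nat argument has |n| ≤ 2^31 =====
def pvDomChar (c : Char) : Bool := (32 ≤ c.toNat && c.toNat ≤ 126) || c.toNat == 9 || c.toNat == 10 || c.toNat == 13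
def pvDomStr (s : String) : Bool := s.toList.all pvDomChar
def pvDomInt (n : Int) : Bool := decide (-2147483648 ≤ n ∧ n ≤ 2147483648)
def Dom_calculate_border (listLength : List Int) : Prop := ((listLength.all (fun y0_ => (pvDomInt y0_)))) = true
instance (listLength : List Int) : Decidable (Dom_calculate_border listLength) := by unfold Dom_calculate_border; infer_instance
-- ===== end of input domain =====

-- B replaces A's indexed loop with its per-column last-element branch (and the fill helper)
-- by a single join of '═'*w segments with the end cap appended once; return values proved equal.

-- ===== PORT A =====
-- helper fill(count, strObj), on List Char
def fillChars (count : Int) (strObj : List Char) : List Char :=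
  (PySem.List.pyRange 0 count 1).foldl (fun acc _ => acc ++ strObj) []

def calculate_border (listLength : List Int) : String :=
  let r := listLength.foldl (fun (st : List Char × Int) _i =>
    let strToken := fillChars (PySem.List.pyGetD listLength st.2 0) ['═']
    let strResult := if st.2 == (listLength.length : Int) - 1
      then st.1 ++ strToken ++ ['═', '╡']
      else st.1 ++ strToken ++ ['═', '╪', '═']
    (strResult, st.2 + 1)) (['╞', '═'], 0)
  String.ofList r.1

-- ===== PORT B =====
def calculate_border_alt (listLength : List Int) : String :=
  if listLength.isEmpty then String.ofList ['╞', '═']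
  else String.ofList (['╞', '═'] ++
    PySem.Chars.join ['═', '╪', '═'] (listLength.map (fun w => List.replicate w.toNat '═')) ++
    ['═', '╡'])

-- ===== PRECONDITION & SPEC =====
def Spec_calculate_border (listLength : List Int) (out : String) : Prop := out = calculate_border_alt listLength
instance (listLength : List Int) (out : String) : Decidable (Spec_calculate_border listLength out) := by unfold Spec_calculate_border; infer_instance

-- ===== CLAIM (what is proved, stated in full; the proofs are below) =====
def Claim_equal_calculate_border : Prop := ∀ (listLength : List Int), Dom_calculate_border listLength → Spec_calculate_border listLength (calculate_border listLength)

-- ===== LEMMAS AND PROOFS =====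

theorem foldl_append_one : ∀ (l : List Int) (a : List Char),
    l.foldl (fun acc _ => acc ++ ['═']) a = a ++ List.replicate l.length '═'
  | [], a => by simp
  | _ :: t, a => by
    simp [List.foldl_cons, List.length_cons, foldl_append_one t, List.replicate_succ]

theorem fillChars_bar (c : Int) : fillChars c ['═'] = List.replicate c.toNat '═' := by
  unfold fillChars
  rw [foldl_append_one]
  simp [PySem.List.length_pyRange_one]

-- the tail of A's result after the initial '╞═'
def tailChars : List Int → List Char
  | [] => []
  | [w] => List.replicate w.toNat '═' ++ ['═', '╡']
  | w :: rest => List.replicate w.toNat '═' ++ ['═', '╪', '═'] ++ tailChars rest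

theorem main_fold (listLength : List Int) :
    ∀ (l pre : List Int) (acc : List Char),
    listLength = pre ++ l →
    (l.foldl (fun (st : List Char × Int) _i =>
      let strToken := fillChars (PySem.List.pyGetD listLength st.2 0) ['═']
      let strResult := if st.2 == (listLength.length : Int) - 1
        then st.1 ++ strToken ++ ['═', '╡']
        else st.1 ++ strToken ++ ['═', '╪', '═']
      (strResult, st.2 + 1)) (acc, (pre.length : Int))).1 = acc ++ tailChars l
  | [], pre, acc, h => by simp [tailChars]
  | w :: rest, pre, acc, h => by
    have hget : PySem.List.pyGetD listLength (pre.length : Int) 0 = w := by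
      rw [PySem.List.pyGetD_natCast, h]
      simp [List.getD]
    rw [List.foldl_cons]
    simp only [hget]
    rcases rest with _ | ⟨w2, rest'⟩
    · have hlast : ((pre.length : Int) == (listLength.length : Int) - 1) = true := by
        subst h; simp
      simp [hlast, tailChars, fillChars_bar]
    · have hnot : ((pre.length : Int) == (listLength.length : Int) - 1) = false := by
        subst h; simp; omega
      simp only [hnot]
      have hpre : listLength = (pre ++ [w]) ++ (w2 :: rest') := by simp [h]
      have hlen : ((pre.length : Int) + 1) = (((pre ++ [w]).length : Nat) : Int) := by
        simp
      rw [hlen, main_fold listLength (w2 :: rest') (pre ++ [w]) _ hpre]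
      simp [tailChars, fillChars_bar]

theorem tailChars_join : ∀ (l : List Int), l ≠ [] →
    tailChars l = PySem.Chars.join ['═', '╪', '═'] (l.map (fun w => List.replicate w.toNat '═')) ++ ['═', '╡']
  | [], h => absurd rfl h
  | [w], _ => by simp [tailChars, PySem.Chars.join_singleton]
  | w :: w2 :: rest, _ => by
    rw [show tailChars (w :: w2 :: rest) =
          List.replicate w.toNat '═' ++ ['═', '╪', '═'] ++ tailChars (w2 :: rest) from rfl,
        tailChars_join (w2 :: rest) (by simp)]
    simp [PySem.Chars.join_cons_cons]

-- ===== VERDICT (by name: the statement is the Claim_ definition above) =====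
theorem calculate_border_spec : Claim_equal_calculate_border := by
  intro listLength _
  unfold Spec_calculate_border calculate_border calculate_border_alt
  have h := main_fold listLength listLength [] ['╞', '═'] (by simp)
  simp only [List.length_nil, Nat.cast_zero] at h
  simp only []
  rw [h]
  by_cases hl : listLength = []
  · subst hl; rfl
  · rw [if_neg (by simp [hl]), tailChars_join listLength hl]
    simp
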